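-- pv_equiv track=rewrite | github.com/jlim61/w3d4_homework | whiteboard.py | attendance
-- ===== SOURCE A (Python) =====
-- def attendance(s):
--     a_count = 0
--     for letter in s:
--         if 'A' in letter:
--             a_count += 1
--     if a_count < 2 and 'LLL' not in s:
--         return True
--     else:
--         return False
-- ===== SOURCE B (Python) =====
-- def attendance(s):
--     a_count = 0
--     streak = 0
--     saw_three = False
--     for ch in s:
--         if ch == 'A':
--             a_count += 1
--         if ch == 'L':
--             streak += 1
--             if streak >= 3:
--                 saw_three = True
--         else:
--             streak = 0
--     return a_count < 2 and not saw_three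
-- ===== Notes on version B (the rewrite author's own statement) =====
-- stated objective: alternative
-- what changed: One combined pass with an absence counter and a consecutive-late streak flag replaces A's count loop plus separate triple-late substring scan.
import Mathlib
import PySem

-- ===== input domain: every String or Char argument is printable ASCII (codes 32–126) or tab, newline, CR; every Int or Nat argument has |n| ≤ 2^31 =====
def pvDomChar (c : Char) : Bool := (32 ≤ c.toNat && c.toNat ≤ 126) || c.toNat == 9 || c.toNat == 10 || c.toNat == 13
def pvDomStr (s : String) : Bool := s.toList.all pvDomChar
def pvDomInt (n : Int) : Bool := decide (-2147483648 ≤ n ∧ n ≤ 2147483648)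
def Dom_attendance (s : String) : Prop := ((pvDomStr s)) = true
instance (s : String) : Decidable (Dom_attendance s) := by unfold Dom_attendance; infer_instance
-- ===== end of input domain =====

-- B replaces A's absence-count loop plus separate triple-late substring scan by one
-- combined pass maintaining an absence counter and a consecutive-late streak flag.

-- ===== PORT A =====
def attendance (s : String) : Bool :=
  let a_count : Int :=
    s.toList.foldl (fun a letter => if PySem.Chars.isIn ['A'] [letter] then a + 1 else a) 0
  if a_count < 2 && !(PySem.Str.isIn "LLL" s) then true else false

-- ===== PORT B =====
def attendanceAltStep (acc : Int × Int × Bool) (ch : Char) : Int × Int × Bool :=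
  let a := if ch == 'A' then acc.1 + 1 else acc.1
  if ch == 'L' then
    let k := acc.2.1 + 1
    (a, k, acc.2.2 || decide (3 ≤ k))
  else
    (a, 0, acc.2.2)

def attendance_alt (s : String) : Bool :=
  let st := s.toList.foldl attendanceAltStep (0, 0, false)
  decide (st.1 < 2) && !st.2.2

-- ===== PRECONDITION & SPEC =====
def Spec_attendance (s : String) (out : Bool) : Prop := out = attendance_alt s
instance (s : String) (out : Bool) : Decidable (Spec_attendance s out) := by unfold Spec_attendance; infer_instance

-- ===== CLAIM (what is proved, stated in full; the proofs are below) =====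
def Claim_equal_attendance : Prop := ∀ (s : String), Dom_attendance s → Spec_attendance s (attendance s)

-- ===== LEMMAS AND PROOFS =====

/-- Proof helper: does `l`, entered with a current late-streak of `k`, reach a streak of 3? -/
def hasStreak (k : Int) : List Char → Bool
  | [] => false
  | c :: t => if c == 'L' then (decide (3 ≤ k + 1) || hasStreak (k + 1) t) else hasStreak 0 t

theorem isIn_singleton (a c : Char) : PySem.Chars.isIn [a] [c] = (c == a) := by
  have h := PySem.Chars.isIn_iff_infix (sub := [a]) (s := [c])
  by_cases hac : a = c
  · subst hac
    simp [h.mpr (List.infix_refl _)]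
  · have hn : ¬ ([a] : List Char) <:+: [c] := by
      simp [List.infix_cons_iff, List.cons_prefix_cons, hac]
    have hf : PySem.Chars.isIn [a] [c] = false := by
      cases hv : PySem.Chars.isIn [a] [c]
      · rfl
      · exact absurd (h.mp hv) hn
    simp [hf]
    exact fun h' => hac h'.symm

theorem foldA_congr (l : List Char) (a : Int) :
    l.foldl (fun a letter => if PySem.Chars.isIn ['A'] [letter] then a + 1 else a) a =
      l.foldl (fun a letter => if letter == 'A' then a + 1 else a) a := by
  simp only [isIn_singleton]

theorem fold_fst (l : List Char) : ∀ (a k : Int) (saw : Bool),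
    (l.foldl attendanceAltStep (a, k, saw)).1 =
      l.foldl (fun a letter => if letter == 'A' then a + 1 else a) a := by
  induction l with
  | nil => intro a k saw; rfl
  | cons c t ih =>
    intro a k saw
    simp only [List.foldl_cons, attendanceAltStep]
    by_cases hL : c = 'L' <;> simp [hL, ih]

theorem fold_saw (l : List Char) : ∀ (a k : Int) (saw : Bool),
    (l.foldl attendanceAltStep (a, k, saw)).2.2 = (saw || hasStreak k l) := by
  induction l with
  | nil => intro a k saw; simp [hasStreak]
  | cons c t ih =>
    intro a k saw
    simp only [List.foldl_cons, attendanceAltStep, hasStreak]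
    by_cases hL : c = 'L' <;> simp [hL, ih, Bool.or_assoc]

theorem streak_iff (l : List Char) :
    (hasStreak 0 l = true ↔ ['L','L','L'] <:+: l) ∧
    (hasStreak 1 l = true ↔ (['L','L'] <+: l ∨ ['L','L','L'] <:+: l)) ∧
    (hasStreak 2 l = true ↔ (['L'] <+: l ∨ ['L','L','L'] <:+: l)) := by
  induction l with
  | nil => simp [hasStreak]
  | cons c t ih =>
    obtain ⟨ih0, ih1, ih2⟩ := ih
    by_cases hc : c = 'L'
    · subst hc
      have h1 : ∀ h : (['L','L'] : List Char) <+: t, (['L'] : List Char) <+: t :=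
        fun h => List.IsPrefix.trans (by simp) h
      refine ⟨?_, ?_, ?_⟩
      · simp [hasStreak, ih1, List.infix_cons_iff, List.cons_prefix_cons]
      · simp [hasStreak, ih2, List.infix_cons_iff, List.cons_prefix_cons]
        tauto
      · simp [hasStreak, List.infix_cons_iff, List.cons_prefix_cons]
    · have hc' : ('L' : Char) ≠ c := fun h => hc h.symm
      refine ⟨?_, ?_, ?_⟩ <;>
        simp [hasStreak, hc, hc', List.infix_cons_iff, List.cons_prefix_cons, ih0]

theorem isIn_LLL (s : String) : PySem.Str.isIn "LLL" s = hasStreak 0 s.toList := by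
  have h1 : PySem.Str.isIn "LLL" s = true ↔ (['L','L','L'] : List Char) <:+: s.toList := by
    simpa using PySem.Str.isIn_iff_infix (sub := "LLL") (s := s)
  have h2 := (streak_iff s.toList).1
  cases hv : hasStreak 0 s.toList
  · cases hw : PySem.Str.isIn "LLL" s
    · rfl
    · exact absurd (h2.mpr (h1.mp hw)) (by simp [hv])
  · exact h1.mpr (h2.mp hv)

-- ===== VERDICT (by name: the statement is the Claim_ definition above) =====
theorem attendance_spec : Claim_equal_attendance := by
  intro s _
  unfold Spec_attendance
  simp only [attendance, attendance_alt, foldA_congr, fold_fst, fold_saw, isIn_LLL, Bool.false_or]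
  cases hb : (decide ((List.foldl (fun a letter => if letter == 'A' then a + 1 else a) 0 s.toList) < 2) && !hasStreak 0 s.toList) <;> simp
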